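-- pv_equiv track=rewrite | github.com/joaoneto9/AI-RAG-Assistent-Python-Lib | src/vector_database_embagge.py | split_themes_readme_files
-- ===== SOURCE A (Python) =====
-- def split_themes_readme_files(text: str) -> list[str]:
--     """
--     Divide o texto do README em blocos baseados em títulos (hashtags),
--     ignorando blocos de código (CodeGroup).
--     """
--     lines = text.splitlines()
--     blocks = []
--     current_block = []
--
--     is_in_code_group = False
--
--     for line in lines:
--         # Detecta limites do CodeGroup
--         if "<CodeGroup>" in line:
--             is_in_code_group = True
--
--         # Se for um título (e não estamos dentro de um CodeGroup),
--         # significa que um novo bloco começou.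
--         if line.strip().startswith("#") and not is_in_code_group:
--             if current_block:
--                 blocks.append("\n".join(current_block))
--             current_block = [line]
--         else:
--             current_block.append(line)
--
--         # Detecta o fechamento após processar a linha para incluir a tag no bloco
--         if "</CodeGroup>" in line:
--             is_in_code_group = False
--
--     # Adiciona o último bloco acumulado
--     if current_block:
--         blocks.append("\n".join(current_block))
--
--     return blocks
-- ===== SOURCE B (Python) =====
-- def _advance(in_code, line):
--     if "</CodeGroup>" in line:
--         return False
--     return in_code or ("<CodeGroup>" in line)
--
-- def _starts_block(in_code, line):
--     return line.strip().startswith("#") and not (in_code or "<CodeGroup>" in line)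
--
-- def split_themes_readme_files(text: str) -> list[str]:
--     lines = text.splitlines()
--     n = len(lines)
--     blocks = []
--     i = 0
--     in_code = False
--     while i < n:
--         # a block always consumes its first line, then extends up to (not
--         # including) the next heading line that is outside any CodeGroup
--         start = i
--         in_code = _advance(in_code, lines[i])
--         i += 1
--         while i < n and not _starts_block(in_code, lines[i]):
--             in_code = _advance(in_code, lines[i])
--             i += 1
--         blocks.append("\n".join(lines[start:i]))
--     return blocks
-- ===== Notes on version B (the rewrite author's own statement) =====
-- stated objective: alternative
-- what changed: Replaced A's fused line-at-a-time state machine (blocks/current_block/flag updated together each line) by a block-at-a-time nested scan: an outer loop that starts a block at the current line and an inner scan that advances to the next heading outside a CodeGroup, slicing lines[start:i] per block.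
import Mathlib
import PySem

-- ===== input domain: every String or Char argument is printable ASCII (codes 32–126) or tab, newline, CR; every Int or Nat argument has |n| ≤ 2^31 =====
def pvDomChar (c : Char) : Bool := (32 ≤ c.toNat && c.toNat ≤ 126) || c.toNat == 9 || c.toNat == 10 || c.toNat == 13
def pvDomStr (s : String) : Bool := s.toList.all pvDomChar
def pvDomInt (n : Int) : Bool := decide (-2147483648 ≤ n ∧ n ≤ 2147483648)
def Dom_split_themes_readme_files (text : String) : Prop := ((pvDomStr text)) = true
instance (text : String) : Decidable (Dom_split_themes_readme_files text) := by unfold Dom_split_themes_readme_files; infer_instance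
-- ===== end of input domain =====

-- B replaces A's fused line-at-a-time state machine by a block-at-a-time nested scan:
-- an outer recursion starting a block and an inner scan to the next heading outside a CodeGroup (alternative decomposition, same cost).

-- ===== PORT A =====
-- loop state: (blocks, current_block, is_in_code_group)
def pvAStep : (List String × List String × Bool) → String → List String × List String × Bool
  | (blocks, current, inCode0), line =>
      let inCode := if PySem.Str.isIn "<CodeGroup>" line then true else inCode0
      let inCode' := if PySem.Str.isIn "</CodeGroup>" line then false else inCode
      if PySem.Str.startswith (PySem.Str.strip line) "#" && !inCode then
        ((if current ≠ [] then blocks ++ [PySem.Str.join "\n" current] else blocks), [line], inCode')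
      else (blocks, current ++ [line], inCode')

-- the code after the loop: append the last accumulated block
def pvAFinish : List String × List String × Bool → List String
  | (blocks, current, _) =>
      if current ≠ [] then blocks ++ [PySem.Str.join "\n" current] else blocks

def split_themes_readme_files (text : String) : List String :=
  pvAFinish ((PySem.Str.splitlines text).foldl pvAStep ([], [], false))

-- ===== PORT B =====
-- Source B's _advance: the code-group state after processing a line
def pvAdvance (inCode : Bool) (line : String) : Bool :=
  if PySem.Str.isIn "</CodeGroup>" line then false
  else inCode || PySem.Str.isIn "<CodeGroup>" line

-- Source B's _starts_block: a heading line outside any CodeGroup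
def pvStartsBlock (inCode : Bool) (line : String) : Bool :=
  PySem.Str.startswith (PySem.Str.strip line) "#" && !(inCode || PySem.Str.isIn "<CodeGroup>" line)

-- Source B's inner while loop: the lines of the current block after its first line,
-- the state at the stopping point, and the remaining lines
def pvScan (inCode : Bool) : List String → List String × Bool × List String
  | [] => ([], inCode, [])
  | l :: ls =>
      if pvStartsBlock inCode l then ([], inCode, l :: ls)
      else
        let (blk, st, rest) := pvScan (pvAdvance inCode l) ls
        (l :: blk, st, rest)

theorem pvScan_rest_le (inCode : Bool) (ls : List String) :
    (pvScan inCode ls).2.2.length ≤ ls.length := by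
  induction ls generalizing inCode with
  | nil => simp [pvScan]
  | cons l ls ih =>
      simp only [pvScan]
      split
      · simp
      · exact le_trans (ih _) (Nat.le_succ _)

-- Source B's outer while loop over blocks
def pvBlocks : List String → Bool → List String
  | [], _ => []
  | l :: ls, inCode =>
      let r := pvScan (pvAdvance inCode l) ls
      PySem.Str.join "\n" (l :: r.1) :: pvBlocks r.2.2 r.2.1
  termination_by ls _ => ls.length
  decreasing_by
    simpa using Nat.lt_succ_of_le (pvScan_rest_le (pvAdvance inCode l) ls)

def split_themes_readme_files_alt (text : String) : List String :=
  pvBlocks (PySem.Str.splitlines text) false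

-- ===== PRECONDITION & SPEC =====
def Spec_split_themes_readme_files (text : String) (out : List String) : Prop := out = split_themes_readme_files_alt text
instance (text : String) (out : List String) : Decidable (Spec_split_themes_readme_files text out) := by unfold Spec_split_themes_readme_files; infer_instance

-- ===== CLAIM (what is proved, stated in full; the proofs are below) =====
def Claim_equal_split_themes_readme_files : Prop := ∀ (text : String), Dom_split_themes_readme_files text → Spec_split_themes_readme_files text (split_themes_readme_files text)

-- ===== LEMMAS AND PROOFS =====

-- A's loop from a nonempty current block agrees with B's scan-and-recurse shape
theorem pvMain (ls : List String) (blocks cur : List String) (inCode : Bool) (hcur : cur ≠ []) :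
    pvAFinish (ls.foldl pvAStep (blocks, cur, inCode)) =
    blocks ++ (let r := pvScan inCode ls;
               PySem.Str.join "\n" (cur ++ r.1) :: pvBlocks r.2.2 r.2.1) := by
  induction ls generalizing blocks cur inCode with
  | nil => simp [pvScan, pvBlocks, pvAFinish, hcur]
  | cons l ls ih =>
      by_cases hc : pvStartsBlock inCode l = true
      · -- cut: A flushes cur; B stops the scan and starts a new block at l
        have hA : pvAStep (blocks, cur, inCode) l
            = (blocks ++ [PySem.Str.join "\n" cur], [l], pvAdvance inCode l) := by
          unfold pvStartsBlock at hc
          unfold pvAStep pvAdvance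
          by_cases h1 : PySem.Str.isIn "<CodeGroup>" l
          <;> by_cases h2 : PySem.Str.isIn "</CodeGroup>" l
          <;> by_cases h3 : PySem.Str.startswith (PySem.Str.strip l) "#"
          <;> simp_all
        rw [List.foldl_cons, hA, ih _ _ _ (by simp)]
        simp only [pvScan, hc, if_pos, pvBlocks]
        simp
      · -- no cut: A extends cur; B's scan consumes l
        have hA : pvAStep (blocks, cur, inCode) l
            = (blocks, cur ++ [l], pvAdvance inCode l) := by
          unfold pvStartsBlock at hc
          unfold pvAStep pvAdvance
          by_cases h1 : PySem.Str.isIn "<CodeGroup>" l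
          <;> by_cases h2 : PySem.Str.isIn "</CodeGroup>" l
          <;> by_cases h3 : PySem.Str.startswith (PySem.Str.strip l) "#"
          <;> simp_all
        rw [List.foldl_cons, hA, ih _ _ _ (by simp)]
        simp only [pvScan, hc, if_neg, Bool.false_eq_true, not_false_iff]
        simp

-- the first line of the text: A's first iteration always ends with current = [l]
theorem pvFirst (l : String) :
    pvAStep ([], [], false) l = ([], [l], pvAdvance false l) := by
  unfold pvAStep pvAdvance
  by_cases h1 : PySem.Str.isIn "<CodeGroup>" l
  <;> by_cases h2 : PySem.Str.isIn "</CodeGroup>" l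
  <;> by_cases h3 : PySem.Str.startswith (PySem.Str.strip l) "#"
  <;> simp_all

-- ===== VERDICT (by name: the statement is the Claim_ definition above) =====
theorem split_themes_readme_files_spec : Claim_equal_split_themes_readme_files := by
  intro text _
  unfold Spec_split_themes_readme_files split_themes_readme_files split_themes_readme_files_alt
  cases h : PySem.Str.splitlines text with
  | nil => simp [pvAFinish, pvBlocks]
  | cons l ls =>
      rw [List.foldl_cons, pvFirst l, pvMain ls [] [l] (pvAdvance false l) (by simp)]
      simp [pvBlocks]
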